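-- pv_equiv track=rewrite | github.com/broadinstitute/qprimer_designer | src/qprimer_designer/commands/pick_representatives.py | find_low_gap_window
-- ===== SOURCE A (Python) =====
-- def find_low_gap_window(seqs, window_size=200):
--     """Find window position with minimum gap content."""
--     if not seqs:
--         return 0
--
--     seq_len = len(seqs[0])
--     best_pos = 0
--     min_gaps = float('inf')
--
--     for pos in range(0, max(1, seq_len - window_size)):
--         gaps = sum(s[pos:pos + window_size].count('-') for s in seqs)
--         if gaps < min_gaps:
--             min_gaps = gaps
--             best_pos = pos
--
--     return best_pos
-- ===== SOURCE B (Python) =====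
-- def find_low_gap_window(seqs, window_size=200):
--     """Find window position with minimum gap content.
--
--     Gap-free alignments return position 0 immediately; otherwise per-column
--     gap counts are accumulated once into prefix sums, so each window is
--     scored by one subtraction instead of re-counting its slices.
--     """
--     if not seqs:
--         return 0
--
--     seq_len = len(seqs[0])
--     if '-' not in '\n'.join(seqs):
--         # no gaps anywhere: every window scores 0, the first position wins
--         return 0
--
--     maxlen = max(len(s) for s in seqs)
--     # pref[j] = total number of '-' in columns 0..j-1 over all sequences
--     pref = [0]
--     for i in range(maxlen):
--         pref.append(pref[-1] + sum(1 for s in seqs if i < len(s) and s[i] == '-'))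
--
--     best_pos = 0
--     min_gaps = None
--     for pos in range(max(1, seq_len - window_size)):
--         a = min(pos, maxlen)
--         b = min(max(pos + window_size, a), maxlen)
--         gaps = pref[b] - pref[a]
--         if min_gaps is None or gaps < min_gaps:
--             min_gaps = gaps
--             best_pos = pos
--     return best_pos
-- ===== Notes on version B (the rewrite author's own statement) =====
-- stated objective: faster
-- what changed: Returns 0 immediately for gap-free alignments, and otherwise accumulates per-column gap counts once into a prefix-sum array so each window is scored by one subtraction instead of re-counting every window slice of every sequence.
-- outside the precondition, e.g. on find_low_gap_window(['--', '--'], -1): A returns 1, B returns 0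
import Mathlib
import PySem

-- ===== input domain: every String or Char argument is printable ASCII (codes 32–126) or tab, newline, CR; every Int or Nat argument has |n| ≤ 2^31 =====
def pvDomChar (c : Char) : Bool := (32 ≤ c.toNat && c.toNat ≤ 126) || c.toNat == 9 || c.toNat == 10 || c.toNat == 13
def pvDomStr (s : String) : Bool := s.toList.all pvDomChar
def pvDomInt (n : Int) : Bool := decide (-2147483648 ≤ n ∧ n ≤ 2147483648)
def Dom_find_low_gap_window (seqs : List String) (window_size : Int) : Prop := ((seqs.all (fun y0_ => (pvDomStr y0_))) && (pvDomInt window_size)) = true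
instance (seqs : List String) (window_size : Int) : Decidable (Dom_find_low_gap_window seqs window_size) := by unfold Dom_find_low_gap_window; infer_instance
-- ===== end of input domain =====

-- B returns 0 at once for gap-free input and otherwise scores each window by a prefix-sum subtraction; a timing run measured it faster.

-- ===== PORT A =====
-- min_gaps = float('inf') is modelled as Option Int with none = +inf (any gap count compares below it).
def find_low_gap_window (seqs : List String) (window_size : Int) : Int :=
  match seqs with
  | [] => 0
  | s0 :: _ =>
    let seq_len : Int := (s0.toList.length : Int)
    let r := (PySem.List.pyRange 0 (max 1 (seq_len - window_size)) 1).foldl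
      (fun st pos =>
        let gaps : Int := seqs.foldl
          (fun acc s => acc + ((PySem.List.slice s.toList (some pos) (some (pos + window_size))).count '-' : Int)) 0
        match st.2 with
        | none => (pos, some gaps)
        | some m => if gaps < m then (pos, some gaps) else st)
      ((0, none) : Int × Option Int)
    r.1

-- ===== PORT B =====
def find_low_gap_window_alt (seqs : List String) (window_size : Int) : Int :=
  match seqs with
  | [] => 0
  | s0 :: _ =>
    let seq_len : Int := (s0.toList.length : Int)
    if PySem.Str.isIn "-" (PySem.Str.join "\n" seqs) = false then 0 else
    let maxlen : Nat := seqs.foldl (fun m s => max m s.toList.length) 0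
    let pref : List Int := (List.range maxlen).foldl
      (fun pref i => pref ++ [pref.getLastD 0 +
        seqs.foldl (fun acc s => acc + (if i < s.toList.length && (s.toList.getD i ' ' == '-') then (1:Int) else 0)) 0])
      [0]
    let r := (PySem.List.pyRange 0 (max 1 (seq_len - window_size)) 1).foldl
      (fun st pos =>
        let a : Int := min pos (maxlen : Int)
        let b : Int := min (max (pos + window_size) a) (maxlen : Int)
        let gaps : Int := pref.getD b.toNat 0 - pref.getD a.toNat 0
        match st.2 with
        | none => (pos, some gaps)
        | some m => if gaps < m then (pos, some gaps) else st)
      ((0, none) : Int × Option Int)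
    r.1

-- ===== PRECONDITION & SPEC =====
-- Pre_ restricts window_size to its natural domain (a nonnegative count); for negative window_size
-- A's slice stop wraps around Python-style, an artefact B does not reproduce.
def Pre_find_low_gap_window (seqs : List String) (window_size : Int) : Prop := 0 ≤ window_size
instance (seqs : List String) (window_size : Int) : Decidable (Pre_find_low_gap_window seqs window_size) := by unfold Pre_find_low_gap_window; infer_instance
def pvWitness_find_low_gap_window : List String × Int := (["AC--G", "A---G"], 2)

def Spec_find_low_gap_window (seqs : List String) (window_size : Int) (out : Int) : Prop := out = find_low_gap_window_alt seqs window_size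
instance (seqs : List String) (window_size : Int) (out : Int) : Decidable (Spec_find_low_gap_window seqs window_size out) := by unfold Spec_find_low_gap_window; infer_instance

-- ===== CLAIM (what is proved, stated in full; the proofs are below) =====
def Claim_equal_find_low_gap_window : Prop := ∀ (seqs : List String) (window_size : Int), Dom_find_low_gap_window seqs window_size → Pre_find_low_gap_window seqs window_size → Spec_find_low_gap_window seqs window_size (find_low_gap_window seqs window_size)

-- ===== LEMMAS AND PROOFS =====

-- pvS seqs j = total '-' count in the first j columns over all sequences
def pvS (seqs : List String) (j : Nat) : Int :=
  seqs.foldl (fun acc s => acc + (((s.toList.take j).count '-' : Nat) : Int)) 0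

theorem sum_map_sub_int {a : Type} (l : List a) (f g : a -> Int) :
    (l.map (fun x => f x - g x)).sum = (l.map f).sum - (l.map g).sum := by
  induction l with
  | nil => simp
  | cons x t ih => simp only [List.map_cons, List.sum_cons, ih]; ring

theorem count_take_succ (l : List Char) (j : Nat) :
    (((l.take (j+1)).count '-' : Nat) : Int)
      = (((l.take j).count '-' : Nat) : Int)
        + (if j < l.length && (l.getD j ' ' == '-') then (1:Int) else 0) := by
  rcases lt_or_ge j l.length with h | h
  · have hgd : l.getD j ' ' = l[j] := by
      simp [List.getD_eq_getElem?_getD, List.getElem?_eq_getElem h]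
    rw [List.take_add_one, List.count_append, List.getElem?_eq_getElem h, hgd]
    by_cases hc : l[j] = '-'
    · simp [h, hc]
    · simp [h, hc]
  · rw [List.take_of_length_le (by omega), List.take_of_length_le h]
    simp [Nat.not_lt.mpr h]

theorem pvS_succ (seqs : List String) (j : Nat) :
    pvS seqs (j + 1) = pvS seqs j
      + seqs.foldl (fun acc s => acc + (if j < s.toList.length && (s.toList.getD j ' ' == '-') then (1:Int) else 0)) 0 := by
  unfold pvS
  rw [PySem.List.foldl_add, PySem.List.foldl_add, PySem.List.foldl_add]
  rw [List.map_congr_left (fun s _ => count_take_succ s.toList j)]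
  rw [PySem.List.sum_map_add_int]
  ring

-- the pref list B builds is exactly [pvS 0, ..., pvS n]
theorem pref_eq (seqs : List String) (n : Nat) :
    (List.range n).foldl
      (fun pref i => pref ++ [pref.getLastD 0 +
        seqs.foldl (fun acc s => acc + (if i < s.toList.length && (s.toList.getD i ' ' == '-') then (1:Int) else 0)) 0])
      [0]
    = (List.range (n + 1)).map (pvS seqs) := by
  induction n with
  | zero => simp [pvS]
  | succ n ih =>
    rw [List.range_succ, List.foldl_append, ih]
    have hlast : ((List.range (n + 1)).map (pvS seqs)).getLastD 0 = pvS seqs n := by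
      rw [List.range_succ, List.map_append]
      simp
    simp only [List.foldl_cons, List.foldl_nil, hlast]
    rw [List.range_succ (n := n+1), List.map_append]
    congr 2
    exact (pvS_succ seqs n).symm

theorem pref_getD (seqs : List String) (n j : Nat) (hj : j ≤ n) :
    ((List.range (n + 1)).map (pvS seqs)).getD j 0 = pvS seqs j := by
  rw [List.getD_eq_getElem?_getD, List.getElem?_map, List.getElem?_range (by omega)]
  rfl

theorem take_min_of_le (l : List Char) (b M : Nat) (h : l.length ≤ M) :
    l.take (min b M) = l.take b := by
  rcases le_or_gt b M with hb | hb
  · rw [min_eq_left hb]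
  · rw [min_eq_right (le_of_lt hb), List.take_of_length_le h,
        List.take_of_length_le (by omega)]

-- A's per-position window count equals B's prefix-sum difference
theorem gaps_eq (seqs : List String) (ws pos : Int) (hws : 0 ≤ ws) (hpos : 0 ≤ pos) :
    seqs.foldl (fun acc s => acc + ((PySem.List.slice s.toList (some pos) (some (pos + ws))).count '-' : Int)) 0
    = pvS seqs (min (pos + ws).toNat (seqs.foldl (fun m s => max m s.toList.length) 0))
      - pvS seqs (min pos.toNat (seqs.foldl (fun m s => max m s.toList.length) 0)) := by
  set M := seqs.foldl (fun m s => max m s.toList.length) 0 with hM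
  have key : ∀ s ∈ seqs,
      (((PySem.List.slice s.toList (some pos) (some (pos + ws))).count '-' : Nat) : Int)
        = (((s.toList.take (min (pos + ws).toNat M)).count '-' : Nat) : Int)
          - (((s.toList.take (min pos.toNat M)).count '-' : Nat) : Int) := by
    intro s hs
    have hlen : s.toList.length ≤ M := by
      exact (PySem.List.le_foldl_max_nat seqs (fun s => s.toList.length) 0).2 s hs
    rw [take_min_of_le _ _ _ hlen, take_min_of_le _ _ _ hlen]
    rw [PySem.List.slice_toNat _ hpos (by omega)]
    have hsplit : s.toList.take (pos + ws).toNat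
        = s.toList.take pos.toNat ++ ((s.toList.drop pos.toNat).take ((pos + ws).toNat - pos.toNat)) := by
      rw [← List.take_add]
      congr 1
      omega
    rw [hsplit, List.count_append]
    push_cast
    ring
  unfold pvS
  rw [PySem.List.foldl_add, PySem.List.foldl_add, PySem.List.foldl_add]
  rw [List.map_congr_left key, sum_map_sub_int]
  ring

-- if '-' does not occur in the '\n'-join, no sequence contains a gap
theorem mem_join_of_mem (sep : List Char) (parts : List (List Char)) (p : List Char)
    (hp : p ∈ parts) (c : Char) (hc : c ∈ p) : c ∈ PySem.Chars.join sep parts := by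
  induction parts with
  | nil => cases hp
  | cons q rest ih =>
    cases rest with
    | nil =>
      rcases List.mem_singleton.mp hp with rfl
      rw [PySem.Chars.join_singleton]; exact hc
    | cons r rest' =>
      rw [PySem.Chars.join_cons_cons]
      rcases List.mem_cons.mp hp with rfl | hp'
      · exact List.mem_append_left _ (List.mem_append_left _ hc)
      · exact List.mem_append_right _ (ih hp')

theorem no_gap_of_isIn_false (seqs : List String)
    (h : PySem.Str.isIn "-" (PySem.Str.join "\n" seqs) = false) :
    ∀ s ∈ seqs, '-' ∉ s.toList := by
  intro s hs hmem
  have hcj : '-' ∈ (PySem.Str.join "\n" seqs).toList := by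
    rw [PySem.Str.toList_join]
    exact mem_join_of_mem _ _ s.toList (List.mem_map_of_mem hs) _ hmem
  obtain ⟨u, v, huv⟩ := List.mem_iff_append.mp hcj
  have hinf : ("-".toList) <:+: (PySem.Str.join "\n" seqs).toList :=
    ⟨u, v, by simp [huv]⟩
  have := (PySem.Str.isIn_iff_infix "-" (PySem.Str.join "\n" seqs)).mpr hinf
  rw [h] at this
  exact Bool.false_ne_true this

theorem loop_zero_aux (G : Int → Int) (R : List Int) (hG : ∀ pos ∈ R, G pos = 0) :
    R.foldl (fun (st : Int × Option Int) pos =>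
        match st.2 with
        | none => (pos, some (G pos))
        | some m => if G pos < m then (pos, some (G pos)) else st)
      (0, some 0) = (0, some 0) := by
  induction R with
  | nil => rfl
  | cons x t ih =>
    have hx := hG x List.mem_cons_self
    simp only [List.foldl_cons]
    rw [hx, if_neg (lt_irrefl (0:Int))]
    exact ih (fun p hp => hG p (List.mem_cons_of_mem _ hp))

theorem loop_zero (G : Int → Int) (N : Int) (hN : 0 < N) (hG : ∀ pos, G pos = 0) :
    ((PySem.List.pyRange 0 N 1).foldl (fun (st : Int × Option Int) pos =>
        match st.2 with
        | none => (pos, some (G pos))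
        | some m => if G pos < m then (pos, some (G pos)) else st)
      ((0, none) : Int × Option Int)).1 = 0 := by
  rw [PySem.List.pyRange_one_cons hN]
  simp only [List.foldl_cons]
  rw [show ((0:Int), some (G 0)) = ((0:Int), some (0:Int)) by rw [hG 0]]
  rw [loop_zero_aux G _ (fun p _ => hG p)]

-- ===== VERDICT (by name: the statement is the Claim_ definition above) =====
theorem find_low_gap_window_spec : Claim_equal_find_low_gap_window := by
  unfold Claim_equal_find_low_gap_window
  intro seqs ws _ hpre
  unfold Spec_find_low_gap_window find_low_gap_window find_low_gap_window_alt
  cases seqs with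
  | nil => rfl
  | cons s0 rest =>
    simp only []
    by_cases hin : PySem.Str.isIn "-" (PySem.Str.join "\n" (s0 :: rest)) = false
    · rw [if_pos hin]
      have hnog := no_gap_of_isIn_false _ hin
      have hG : ∀ pos : Int,
          (s0 :: rest).foldl (fun acc s =>
            acc + ((PySem.List.slice s.toList (some pos) (some (pos + ws))).count '-' : Int)) 0 = 0 := by
        intro pos
        rw [PySem.List.foldl_add]
        have hz : ∀ s ∈ (s0 :: rest),
            (((PySem.List.slice s.toList (some pos) (some (pos + ws))).count '-' : Nat) : Int) = (0 : Int) := by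
          intro s hs
          have : (PySem.List.slice s.toList (some pos) (some (pos + ws))).count '-' = 0 :=
            List.count_eq_zero.mpr (fun hm => hnog s hs (PySem.List.mem_of_mem_slice _ _ _ hm))
          simp [this]
        rw [List.map_congr_left hz]
        simp
      exact loop_zero
        (fun pos => (s0 :: rest).foldl (fun acc s =>
          acc + ((PySem.List.slice s.toList (some pos) (some (pos + ws))).count '-' : Int)) 0)
        (max 1 ((s0.toList.length : Int) - ws)) (by omega) hG
    · rw [if_neg hin]
      congr 1
      rw [pref_eq]
      apply PySem.List.foldl_congr_mem
      intro acc pos hmem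
      have hpos : 0 ≤ pos := by
        have := (PySem.List.mem_pyRange_one.mp hmem).1
        omega
      have hws : (0:Int) ≤ ws := hpre
      set M := (s0 :: rest).foldl (fun m s => max m s.toList.length) 0 with hMdef
      have ha : min pos (M : Int) = ((min pos.toNat M : Nat) : Int) := by omega
      rw [ha]
      have hb : min (max (pos + ws) ((min pos.toNat M : Nat) : Int)) (M : Int)
          = ((min (pos + ws).toNat M : Nat) : Int) := by omega
      rw [hb]
      rw [Int.toNat_natCast, Int.toNat_natCast]
      rw [pref_getD _ _ _ (by omega), pref_getD _ _ _ (by omega)]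
      rw [gaps_eq _ _ _ hws hpos, ← hMdef]
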